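-- pv_equiv track=rewrite | github.com/sun-hainan/Python | _worktree_backup/project_euler/problem_115/sol1.py | solution
-- ===== SOURCE A (Python) =====
-- from itertools import count
--
-- def solution(min_block_length: int = 50) -> int:
--     """
--     Returns for given minimum block length the least value of n
--     for which the fill-count function first exceeds one million
--     # 遍历循环
--
--     >>> solution(3)
--     30
--
--     >>> solution(10)
--     57
--     """
--
--     fill_count_functions = [1] * min_block_length
--
--     for n in count(min_block_length):
--     # 遍历循环
--         fill_count_functions.append(1)
--
--         for block_length in range(min_block_length, n + 1):
--     # 遍历循环
--             for block_start in range(n - block_length):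
--                 fill_count_functions[n] += fill_count_functions[
--                     n - block_start - block_length - 1
--                 ]
--
--             fill_count_functions[n] += 1
--
--         if fill_count_functions[n] > 1_000_000:
--             break
--
--     return n
-- ===== SOURCE B (Python) =====
-- def solution(min_block_length: int = 50) -> int:
--     """Least n for which the fill-count function first exceeds one million.
--
--     One pass with the linear recurrence f(n) = f(n-1) + 1 + sum(f[0..n-m-1]),
--     maintaining that suffix-lagged prefix sum as a running value: O(n) instead
--     of A's triple loop.
--     """
--     m = min_block_length
--     fills = [1] * m
--     prev = fills[-1]      # f(n-1)
--     window = 0            # sum of fills[0 .. n-m-1]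
--     n = m
--     while True:
--         val = prev + 1 + window
--         fills.append(val)
--         if val > 1_000_000:
--             return n
--         window += fills[n - m]
--         prev = val
--         n += 1
-- ===== Notes on version B (the rewrite author's own statement) =====
-- stated objective: faster
-- what changed: Replaced the triple nested loop (for each n, summing fill counts over all block lengths and block starts) by the linear recurrence f(n) = f(n-1) + 1 + prefix_sum(f[0..n-m-1]) with the lagged prefix sum maintained as a running value, one O(1) step per n.
-- outside the precondition, e.g. on solution(0): A returns 14, B raises IndexError; on solution(-1): A returns 10, B raises IndexError
import Mathlib
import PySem

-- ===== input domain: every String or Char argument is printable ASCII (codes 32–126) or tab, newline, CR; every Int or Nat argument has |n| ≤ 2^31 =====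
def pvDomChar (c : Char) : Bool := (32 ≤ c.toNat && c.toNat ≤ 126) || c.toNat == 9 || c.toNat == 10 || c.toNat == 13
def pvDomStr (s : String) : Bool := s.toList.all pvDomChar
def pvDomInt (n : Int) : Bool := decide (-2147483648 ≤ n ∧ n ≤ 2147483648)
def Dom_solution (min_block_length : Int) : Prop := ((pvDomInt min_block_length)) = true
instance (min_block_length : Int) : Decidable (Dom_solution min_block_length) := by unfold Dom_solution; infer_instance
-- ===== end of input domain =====

-- B replaces A's triple nested loop by a linear recurrence with a running lagged prefix sum (one O(1) step per n).

-- xs[i] read; Python raises out of range, but every read performed inside Pre_ is in range (proved below)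
def aGet (xs : List Int) (i : Int) : Int := PySem.List.pyGetD xs i 0

-- ===== PORT A =====
-- 'for block_start in range(n - block_length): fill[n] += fill[n - block_start - block_length - 1]'
def innerStartLoop (n bl : Int) (xs : List Int) : List Int :=
  (PySem.List.pyRange 0 (n - bl) 1).foldl
    (fun ys s => ys.set n.toNat (aGet ys n + aGet ys (n - s - bl - 1))) xs

-- 'for block_length in range(min_block_length, n + 1): …; fill[n] += 1'
def innerBlockLoop (m n : Int) (xs : List Int) : List Int :=
  (PySem.List.pyRange m (n + 1) 1).foldl
    (fun ys bl =>
      let zs := innerStartLoop n bl ys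
      zs.set n.toNat (aGet zs n + 1)) xs

-- 'for n in count(min_block_length): fill.append(1); …; if fill[n] > 1_000_000: break'.
-- The unbounded count(...) loop is ported with fuel; inside Pre_ the fill counts grow by
-- at least 1 per iteration from 2, so the break fires long before 1000000 iterations.
def aLoop (m : Int) : Nat → List Int → Int → Int
  | 0, _, n => n
  | fuel+1, xs, n =>
    let xs1 := innerBlockLoop m n (xs ++ [1])
    if aGet xs1 n > 1000000 then n else aLoop m fuel xs1 (n + 1)

def solution (min_block_length : Int) : Int :=
  aLoop min_block_length 1000000 (List.replicate min_block_length.toNat 1) min_block_length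

-- ===== PORT B =====
-- 'while True: val = prev + 1 + window; fills.append(val); if val > 1_000_000: return n;
--  window += fills[n - m]; prev = val; n += 1'  (same fuel scheme as A's unbounded loop)
def bLoop (m : Int) : Nat → List Int → Int → Int → Int → Int
  | 0, _, _, _, n => n
  | fuel+1, fills, prev, window, n =>
    let val := prev + 1 + window
    let fills1 := fills ++ [val]
    if val > 1000000 then n
    else bLoop m fuel fills1 val (window + aGet fills1 (n - m)) (n + 1)

def solution_alt (min_block_length : Int) : Int :=
  let fills := List.replicate min_block_length.toNat 1
  bLoop min_block_length 1000000 fills (aGet fills (-1)) 0 min_block_length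

-- ===== PRECONDITION & SPEC =====
-- Pre_ excludes non-positive block lengths: there A either raises IndexError or returns a value
-- resting on an empty initial table and negative-index wraparound, an artefact of its implementation,
-- and B's natural prefix-sum setup itself raises IndexError there (fills[-1] on an empty list).
def Pre_solution (min_block_length : Int) : Prop := 1 ≤ min_block_length
instance (min_block_length : Int) : Decidable (Pre_solution min_block_length) := by
  unfold Pre_solution; infer_instance

def pvWitness_solution : Int := (3)

def Spec_solution (min_block_length : Int) (out : Int) : Prop := out = solution_alt min_block_length
instance (min_block_length : Int) (out : Int) : Decidable (Spec_solution min_block_length out) := by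
  unfold Spec_solution; infer_instance

-- ===== CLAIM (what is proved, stated in full; the proofs are below) =====
def Claim_equal_solution : Prop := ∀ (min_block_length : Int), Dom_solution min_block_length → Pre_solution min_block_length → Spec_solution min_block_length (solution min_block_length)

-- ===== LEMMAS AND PROOFS =====

-- The common fill-count sequence g, built as a growing table: glist M k = [g 0, …, g (k-1)].
def gstep (M : Nat) (xs : List Int) (k : Nat) : Int :=
  if k < M then 1 else xs.getD (k-1) 0 + 1 + (xs.take (k - M)).sum

def glist (M : Nat) : Nat → List Int
  | 0 => []
  | k+1 => glist M k ++ [gstep M (glist M k) k]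

def g (M k : Nat) : Int := gstep M (glist M k) k

def Psum (M t : Nat) : Int := (glist M t).sum

lemma glist_succ (M k : Nat) : glist M (k+1) = glist M k ++ [g M k] := rfl

lemma glist_eq_map (M k : Nat) : glist M k = (List.range k).map (g M) := by
  induction k with
  | zero => rfl
  | succ k ih => rw [glist_succ, ih, List.range_succ, List.map_append]; rfl

lemma glist_length (M k : Nat) : (glist M k).length = k := by
  rw [glist_eq_map]; simp

lemma getD_glist (M : Nat) {i k : Nat} (h : i < k) : (glist M k).getD i 0 = g M i := by
  rw [glist_eq_map, List.getD, List.getElem?_map]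
  simp [List.getElem?_range h]

lemma take_glist (M : Nat) {j k : Nat} (h : j ≤ k) : (glist M k).take j = glist M j := by
  rw [glist_eq_map, glist_eq_map, ← List.map_take, List.take_range, Nat.min_eq_left h]

lemma g_lt (M k : Nat) (h : k < M) : g M k = 1 := by
  simp [g, gstep, h]

lemma g_ge (M k : Nat) (hM : 1 ≤ M) (h : M ≤ k) : g M k = g M (k-1) + 1 + Psum M (k - M) := by
  rw [g, gstep, if_neg (by omega), getD_glist M (by omega), take_glist M (by omega)]
  rfl

lemma glist_replicate (M : Nat) : glist M M = List.replicate M 1 := by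
  suffices h : ∀ k, k ≤ M → glist M k = List.replicate k 1 from h M le_rfl
  intro k
  induction k with
  | zero => intro _; rfl
  | succ k ih =>
    intro hk
    rw [glist_succ, ih (by omega), List.replicate_succ']
    have : g M k = 1 := by
      rw [g, gstep, if_pos (by omega)]
    rw [this]

lemma Psum_succ (M t : Nat) : Psum M (t+1) = Psum M t + g M t := by
  simp [Psum, glist_succ]

lemma sum_map_range_eq (f : Nat → Int) (k : Nat) :
    ((List.range k).map f).sum = ∑ i ∈ Finset.range k, f i := by
  induction k with
  | zero => rfl
  | succ k ih => rw [List.range_succ, List.map_append, List.sum_append,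
      Finset.sum_range_succ, ih]; simp

lemma Psum_eq (M k : Nat) : Psum M k = ∑ j ∈ Finset.range k, g M j := by
  rw [Psum, glist_eq_map, sum_map_range_eq]

-- reads below the length of ws pass through an append
lemma aGet_append_lt {ws ts : List Int} {i : Int} (h0 : 0 ≤ i) (h : i < (ws.length : Int)) :
    aGet (ws ++ ts) i = aGet ws i := by
  unfold aGet
  rw [PySem.List.pyGetD_eq_getElem _ _ h0 (by simp; omega),
      PySem.List.pyGetD_eq_getElem _ _ h0 h,
      List.getElem_append_left (by omega)]

lemma aGet_append_last (ws : List Int) (c : Int) : aGet (ws ++ [c]) (ws.length : Int) = c := by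
  unfold aGet
  rw [PySem.List.pyGetD_eq_getElem _ _ (by positivity) (by simp)]
  simp

lemma set_append_last (ws : List Int) (a b : Int) : (ws ++ [a]).set ws.length b = ws ++ [b] := by
  rw [List.set_append_right _ _ le_rfl]
  simp

lemma aGet_glist (M : Nat) {k : Nat} {i : Int} (h0 : 0 ≤ i) (h : i < (k : Int)) :
    aGet (glist M k) i = g M i.toNat := by
  unfold aGet
  rw [PySem.List.pyGetD_eq_getElem _ _ h0 (by rw [glist_length]; exact_mod_cast h)]
  rw [← List.getD_eq_getElem _ 0, getD_glist M (by omega)]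

-- the block_start loop: a fold of 'set last (last + read)' steps equals one set of last + a sum
lemma foldl_set_add (ws : List Int) (n : Int) (hn : n = (ws.length : Int)) (q : Int → Int) :
    ∀ (l : List Int) (c : Int), (∀ s ∈ l, 0 ≤ q s ∧ q s < (ws.length : Int)) →
      l.foldl (fun ys s => ys.set n.toNat (aGet ys n + aGet ys (q s))) (ws ++ [c])
        = ws ++ [c + (l.map (fun s => aGet ws (q s))).sum] := by
  intro l
  induction l with
  | nil => intro c _; simp
  | cons s l ih =>
    intro c hq
    have hs := hq s (by simp)
    have hstep : (ws ++ [c]).set n.toNat (aGet (ws ++ [c]) n + aGet (ws ++ [c]) (q s))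
        = ws ++ [c + aGet ws (q s)] := by
      rw [hn, aGet_append_last, aGet_append_lt hs.1 hs.2, Int.toNat_natCast, set_append_last]
    rw [List.foldl_cons, hstep, ih (c + aGet ws (q s)) (fun x hx => hq x (by simp [hx]))]
    rw [List.map_cons, List.sum_cons, add_assoc]

lemma innerStartLoop_spec (M nn : Nat) (bl : Int) (c : Int) (hbl : 1 ≤ bl) (_hbn : bl ≤ (nn : Int)) :
    innerStartLoop (nn : Int) bl (glist M nn ++ [c])
      = glist M nn ++ [c + ((PySem.List.pyRange 0 ((nn : Int) - bl) 1).map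
          (fun s => aGet (glist M nn) ((nn : Int) - s - bl - 1))).sum] := by
  unfold innerStartLoop
  exact foldl_set_add (glist M nn) (nn : Int) (by rw [glist_length]) _ _ c
    (fun s hs => by
      rw [PySem.List.mem_pyRange_one] at hs
      rw [glist_length]
      omega)

-- the inner sum is the prefix sum Psum (nn - bl)
lemma innerSum_eq (M nn : Nat) (bl : Int) (hbl : 1 ≤ bl) (hbn : bl ≤ (nn : Int)) :
    ((PySem.List.pyRange 0 ((nn : Int) - bl) 1).map
        (fun s => aGet (glist M nn) ((nn : Int) - s - bl - 1))).sum
      = Psum M ((nn : Int) - bl).toNat := by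
  set k : Nat := ((nn : Int) - bl).toNat with hk
  have hkb : ((nn : Int) - bl) = (k : Int) := by omega
  rw [hkb, PySem.List.pyRange_one, List.map_map]
  simp only [sub_zero, Int.toNat_natCast]
  have hterm : ∀ i ∈ List.range k,
      ((fun s => aGet (glist M nn) ((nn : Int) - s - bl - 1)) ∘ fun j : Nat => (0 : Int) + (j : Int)) i
        = g M (k - 1 - i) := by
    intro i hi
    rw [List.mem_range] at hi
    simp only [Function.comp]
    have harg : (nn : Int) - ((0 : Int) + (i : Int)) - bl - 1 = ((k - 1 - i : Nat) : Int) := by omega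
    rw [harg, aGet_glist M (by positivity) (by omega), Int.toNat_natCast]
  rw [List.map_congr_left hterm, sum_map_range_eq, Finset.sum_range_reflect, Psum_eq]

-- the block_length loop: appending 1 then running both loops writes exactly g M nn
def V (M nn : Nat) : Int := 1 + ∑ t ∈ Finset.range (nn - M + 1), (Psum M t + 1)

lemma foldl_block (M nn : Nat) :
    ∀ (l : List Int) (c : Int), (∀ bl ∈ l, 1 ≤ bl ∧ bl ≤ (nn : Int)) →
      l.foldl (fun ys bl =>
          let zs := innerStartLoop (nn : Int) bl ys
          zs.set ((nn : Int)).toNat (aGet zs (nn : Int) + 1)) (glist M nn ++ [c])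
        = glist M nn ++ [c + (l.map (fun bl => Psum M ((nn : Int) - bl).toNat + 1)).sum] := by
  intro l
  induction l with
  | nil => intro c _; simp
  | cons bl l ih =>
    intro c hq
    have hb := hq bl (by simp)
    have hlen : (nn : Int) = ((glist M nn).length : Int) := by rw [glist_length]
    have hzs : innerStartLoop (nn : Int) bl (glist M nn ++ [c])
        = glist M nn ++ [c + Psum M ((nn : Int) - bl).toNat] := by
      rw [innerStartLoop_spec M nn bl c hb.1 hb.2, innerSum_eq M nn bl hb.1 hb.2]
    have hstep : (glist M nn ++ [c + Psum M ((nn : Int) - bl).toNat]).set ((nn : Int)).toNat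
          (aGet (glist M nn ++ [c + Psum M ((nn : Int) - bl).toNat]) (nn : Int) + 1)
        = glist M nn ++ [c + (Psum M ((nn : Int) - bl).toNat + 1)] := by
      rw [hlen, aGet_append_last, Int.toNat_natCast, set_append_last, add_assoc]
    rw [List.foldl_cons]
    simp only []
    rw [hzs, hstep, ih _ (fun x hx => hq x (by simp [hx]))]
    rw [List.map_cons, List.sum_cons, add_assoc]

lemma innerBlockLoop_spec (M nn : Nat) (hM : 1 ≤ M) (h : M ≤ nn) :
    innerBlockLoop (M : Int) (nn : Int) (glist M nn ++ [1]) = glist M nn ++ [V M nn] := by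
  unfold innerBlockLoop
  rw [foldl_block M nn _ 1 (fun bl hbl => by
    rw [PySem.List.mem_pyRange_one] at hbl
    constructor <;> omega)]
  congr 2
  rw [PySem.List.pyRange_one, List.map_map]
  have hK : (((nn : Int) + 1 - (M : Int)).toNat) = nn - M + 1 := by omega
  rw [hK]
  have hterm : ∀ i ∈ List.range (nn - M + 1),
      ((fun bl => Psum M ((nn : Int) - bl).toNat + 1) ∘ fun k : Nat => (M : Int) + (k : Int)) i
        = Psum M (nn - M - i) + 1 := by
    intro i hi
    rw [List.mem_range] at hi
    simp only [Function.comp]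
    congr 2
    omega
  rw [List.map_congr_left hterm, sum_map_range_eq, V]
  congr 1
  refine Eq.trans (Finset.sum_congr rfl ?_)
    (Finset.sum_range_reflect (fun t => Psum M t + 1) (nn - M + 1))
  intro i hi
  rw [Finset.mem_range] at hi
  congr 2

lemma V_eq_g (M nn : Nat) (hM : 1 ≤ M) (h : M ≤ nn) : V M nn = g M nn := by
  induction nn, h using Nat.le_induction with
  | base =>
    rw [V, g_ge M M hM le_rfl, g_lt M (M-1) (by omega)]
    have h1 : M - M + 1 = 1 := by omega
    rw [h1, Finset.sum_range_one, Nat.sub_self]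
    simp [Psum, glist]
  | succ nn hnn ih =>
    rw [V]
    have h2 : nn + 1 - M + 1 = (nn - M + 1) + 1 := by omega
    rw [h2, Finset.sum_range_succ, ← add_assoc, ← V, ih,
        g_ge M (nn+1) hM (by omega), Nat.add_sub_cancel]
    have h3 : nn + 1 - M = nn - M + 1 := by omega
    rw [h3]
    ring

-- A's whole per-n body maps the table for n to the table for n+1
lemma aStep (M nn : Nat) (hM : 1 ≤ M) (h : M ≤ nn) :
    innerBlockLoop (M : Int) (nn : Int) (glist M nn ++ [1]) = glist M (nn + 1) := by
  rw [innerBlockLoop_spec M nn hM h, V_eq_g M nn hM h, glist_succ]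

-- lockstep: with equal fuel, A's loop and B's loop return the same n
lemma loop_eq (M : Nat) (hM : 1 ≤ M) :
    ∀ (fuel : Nat) (nn : Nat), M ≤ nn →
      aLoop (M : Int) fuel (glist M nn) (nn : Int)
        = bLoop (M : Int) fuel (glist M nn) (g M (nn - 1)) (Psum M (nn - M)) (nn : Int) := by
  intro fuel
  induction fuel with
  | zero => intro nn _; rfl
  | succ fuel ih =>
    intro nn h
    have hval : g M (nn - 1) + 1 + Psum M (nn - M) = g M nn := (g_ge M nn hM h).symm
    have hA : innerBlockLoop (M : Int) (nn : Int) (glist M nn ++ [1]) = glist M (nn + 1) :=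
      aStep M nn hM h
    have hget : aGet (glist M (nn + 1)) (nn : Int) = g M nn := by
      rw [aGet_glist M (by positivity) (by exact_mod_cast Nat.lt_succ_self nn), Int.toNat_natCast]
    show (if aGet (innerBlockLoop (M : Int) (nn : Int) (glist M nn ++ [1])) (nn : Int) > 1000000
          then (nn : Int)
          else aLoop (M : Int) fuel (innerBlockLoop (M : Int) (nn : Int) (glist M nn ++ [1])) ((nn : Int) + 1))
        = _
    rw [hA, hget]
    show _ = (if g M (nn - 1) + 1 + Psum M (nn - M) > 1000000 then (nn : Int)
          else bLoop (M : Int) fuel (glist M nn ++ [g M (nn - 1) + 1 + Psum M (nn - M)])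
            (g M (nn - 1) + 1 + Psum M (nn - M))
            (Psum M (nn - M) + aGet (glist M nn ++ [g M (nn - 1) + 1 + Psum M (nn - M)]) ((nn : Int) - (M : Int)))
            ((nn : Int) + 1))
    rw [hval, ← glist_succ]
    by_cases hbig : g M nn > 1000000
    · rw [if_pos hbig, if_pos hbig]
    · rw [if_neg hbig, if_neg hbig]
      have hwin : aGet (glist M (nn + 1)) ((nn : Int) - (M : Int)) = g M (nn - M) := by
        rw [show (nn : Int) - (M : Int) = ((nn - M : Nat) : Int) by omega,
            aGet_glist M (by positivity) (by exact_mod_cast by omega), Int.toNat_natCast]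
      have hps : Psum M (nn - M) + g M (nn - M) = Psum M (nn + 1 - M) := by
        rw [show nn + 1 - M = (nn - M) + 1 by omega, Psum_succ]
      rw [hwin, hps, show (nn : Int) + 1 = ((nn + 1 : Nat) : Int) by push_cast; ring]
      have hrec := ih (nn + 1) (by omega)
      rw [show nn + 1 - 1 = nn by omega] at hrec
      exact hrec

-- ===== VERDICT (by name: the statement is the Claim_ definition above) =====
theorem solution_spec : Claim_equal_solution := by
  intro m _ hpre
  unfold Pre_solution at hpre
  unfold Spec_solution solution solution_alt
  show aLoop m 1000000 (List.replicate m.toNat 1) m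
      = bLoop m 1000000 (List.replicate m.toNat 1) (aGet (List.replicate m.toNat 1) (-1)) 0 m
  set M : Nat := m.toNat with hMdef
  have hm : m = (M : Int) := by omega
  have hM1 : 1 ≤ M := by omega
  have hne : List.replicate M (1 : Int) ≠ [] := by simp; omega
  have hprev : aGet (List.replicate M (1 : Int)) (-1) = g M (M - 1) := by
    unfold aGet
    rw [PySem.List.pyGetD_neg_one _ _ hne,
        List.eq_of_mem_replicate (List.getLast_mem hne)]
    exact (g_lt M (M - 1) (by omega)).symm
  rw [hprev, hm, ← glist_replicate M]
  have hfin := loop_eq M hM1 1000000 M le_rfl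
  rw [Nat.sub_self] at hfin
  exact hfin
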